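-- pv_equiv track=rewrite | github.com/nyu-cds/sx550_assignment3 | binary.py | zbits
-- ===== SOURCE A (Python) =====
-- from itertools import combinations
--
-- def zbits(n, k):
--     '''
--     Generate a set of all binary strings of length n that contain k zero bits.
--
--     Args:
--         n - length of binary strings
--         k - number of zeros
--
--     Return:
--         result - a set of all such binary strings
--     '''
--     # Raise exception if k or n is not an int or even not a number
--     try:
--         # If k or n is not an int
--         if int(k) != k or int(n) != n:
--             raise ValueError("k and n must be int")
--     except:
--         # If k or n can not be converted to int
--         raise ValueError("k and n must be int")
--     else:
--         # Raise exception if n<=0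
--         if n <= 0:
--             raise ValueError("n must be greater than 0")
--
--         # Raise exception if k<0
--         if k < 0:
--             raise ValueError("k must be greater than or equal to 0")
--
--         # Raise exception if k>n
--         if k > n:
--             raise ValueError("k must be less than or equal to n")
--
--         # Initialize the result set
--         result = set()
--
--         # Initialize all indeces of length n
--         all_indices = range(n)
--
--         # Use itertools.combinations to generate all combinations of indices of '0' and let others be '1'
--         for indices_of_zeros in combinations(all_indices, k):
--             # Generate a list of '0' and '1' according to indices_of_zeros
--             # Use ''.join() to convert it into a string
--             result.add(''.join(['0' if x in indices_of_zeros else '1' for x in all_indices]))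
--
--         return result
-- ===== SOURCE B (Python) =====
-- def zbits(n, k):
--     '''
--     Generate a set of all binary strings of length n that contain k zero bits,
--     by recursive DFS over the remaining zero/one budgets instead of itertools.combinations.
--     '''
--     # Same validation prologue as the original
--     try:
--         if int(k) != k or int(n) != n:
--             raise ValueError("k and n must be int")
--     except:
--         raise ValueError("k and n must be int")
--     else:
--         if n <= 0:
--             raise ValueError("n must be greater than 0")
--         if k < 0:
--             raise ValueError("k must be greater than or equal to 0")
--         if k > n:
--             raise ValueError("k must be less than or equal to n")
--
--         result = set()
--
--         def helper(prefix, zeros_left, ones_left):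
--             if zeros_left == 0 and ones_left == 0:
--                 result.add(prefix)
--                 return
--             if zeros_left > 0:
--                 helper(prefix + '0', zeros_left - 1, ones_left)
--             if ones_left > 0:
--                 helper(prefix + '1', zeros_left, ones_left - 1)
--
--         helper('', k, n - k)
--         return result
-- ===== Notes on version B (the rewrite author's own statement) =====
-- stated objective: alternative
-- what changed: Replaces the itertools.combinations-of-zero-indices enumeration (membership test per position per combination) with a recursive DFS on the remaining zero/one budgets that builds each string once by appending characters; validation prologue is kept unchanged.
import Mathlib
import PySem

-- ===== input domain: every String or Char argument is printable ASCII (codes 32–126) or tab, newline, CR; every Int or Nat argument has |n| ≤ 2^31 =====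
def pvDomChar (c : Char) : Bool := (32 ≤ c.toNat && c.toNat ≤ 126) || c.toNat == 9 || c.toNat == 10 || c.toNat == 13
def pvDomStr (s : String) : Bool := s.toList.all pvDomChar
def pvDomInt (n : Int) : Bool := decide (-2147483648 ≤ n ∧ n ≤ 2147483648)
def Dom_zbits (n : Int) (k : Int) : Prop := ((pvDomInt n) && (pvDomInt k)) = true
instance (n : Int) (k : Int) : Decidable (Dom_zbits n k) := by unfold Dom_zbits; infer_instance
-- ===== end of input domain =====

-- B replaces the combinations-over-zero-indices enumeration with a recursive DFS on the
-- remaining zero/one budgets (alternative decomposition, same validation behaviour).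


-- ===== PORT A =====
-- itertools.combinations(l, k) in lexicographic order of index tuples
def pvCombos : List Int → Nat → List (List Int)
  | _, 0 => [[]]
  | [], _ + 1 => []
  | x :: xs, k + 1 => (pvCombos xs k).map (fun c => x :: c) ++ pvCombos xs (k + 1)

-- Python raises ValueError outside Pre_zbits (the int(k)!=k check never fires on Int inputs);
-- the port returns [] on those excluded inputs.
def zbits (n : Int) (k : Int) : List String :=
  if n ≤ 0 then []
  else if k < 0 then []
  else if n < k then []
  else
    let allIndices := PySem.List.pyRange 0 n 1
    (pvCombos allIndices k.toNat).foldl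
      (fun result c =>
        PySem.Set.add result
          (String.ofList (allIndices.map (fun x => if c.contains x then '0' else '1'))))
      PySem.Set.empty

-- ===== PORT B =====
-- helper(prefix, zeros_left, ones_left) from Source B; result set threaded as accumulator
def pvDfs (p : List Char) (z o : Nat) (acc : PySem.Set String) : PySem.Set String :=
  if z = 0 ∧ o = 0 then PySem.Set.add acc (String.ofList p)
  else
    let acc1 := if _hz : 0 < z then pvDfs (p ++ ['0']) (z - 1) o acc else acc
    if _ho : 0 < o then pvDfs (p ++ ['1']) z (o - 1) acc1 else acc1
termination_by z + o
decreasing_by all_goals omega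

def zbits_alt (n : Int) (k : Int) : List String :=
  if n ≤ 0 then []
  else if k < 0 then []
  else if n < k then []
  else pvDfs [] k.toNat (n - k).toNat PySem.Set.empty

-- ===== PRECONDITION & SPEC =====
-- exactly the inputs on which the Python zbits returns (elsewhere it raises ValueError)
def Pre_zbits (n : Int) (k : Int) : Prop := 0 < n ∧ 0 ≤ k ∧ k ≤ n
instance (n : Int) (k : Int) : Decidable (Pre_zbits n k) := by unfold Pre_zbits; infer_instance
def pvWitness_zbits : Int × Int := (3, 1)

def Spec_zbits (n : Int) (k : Int) (out : List String) : Prop := out = zbits_alt n k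
instance (n : Int) (k : Int) (out : List String) : Decidable (Spec_zbits n k out) := by unfold Spec_zbits; infer_instance

-- ===== CLAIM (what is proved, stated in full; the proofs are below) =====
def Claim_equal_zbits : Prop := ∀ (n : Int) (k : Int), Dom_zbits n k → Pre_zbits n k → Spec_zbits n k (zbits n k)

-- ===== LEMMAS AND PROOFS =====

-- canonical list of char-lists with z zeros and o ones, in lexicographic order
def pvG (z o : Nat) : List (List Char) :=
  if z = 0 ∧ o = 0 then [[]]
  else
    (if _hz : 0 < z then (pvG (z - 1) o).map (fun cs => '0' :: cs) else []) ++
    (if _ho : 0 < o then (pvG z (o - 1)).map (fun cs => '1' :: cs) else [])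
termination_by z + o
decreasing_by all_goals omega

theorem pvCombos_subset {l : List Int} : ∀ {k : Nat} {c : List Int}, c ∈ pvCombos l k → ∀ x ∈ c, x ∈ l := by
  induction l with
  | nil =>
    intro k c hc x hx
    cases k with
    | zero => simp [pvCombos] at hc; simp [hc] at hx
    | succ k => simp [pvCombos] at hc
  | cons a l ih =>
    intro k c hc x hx
    cases k with
    | zero => simp [pvCombos] at hc; simp [hc] at hx
    | succ k =>
      simp only [pvCombos, List.mem_append, List.mem_map] at hc
      rcases hc with ⟨c', hc', rfl⟩ | hc
      · rcases List.mem_cons.mp hx with rfl | hx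
        · exact List.mem_cons_self
        · exact List.mem_cons_of_mem _ (ih hc' x hx)
      · exact List.mem_cons_of_mem _ (ih hc x hx)

theorem pvCombos_nil_of_lt {l : List Int} : ∀ {k : Nat}, l.length < k → pvCombos l k = [] := by
  induction l with
  | nil => intro k hk; cases k with
    | zero => omega
    | succ k => simp [pvCombos]
  | cons a l ih =>
    intro k hk
    cases k with
    | zero => simp at hk
    | succ k =>
      simp only [pvCombos]
      rw [ih (by simpa using hk), ih (by simp at hk; omega)]
      simp

-- A's per-combination string, over index list `l`, equals '0'/'1' marking
theorem pvCombos_map_eq_pvG : ∀ (l : List Int), l.Nodup → ∀ k : Nat, k ≤ l.length →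
    (pvCombos l k).map (fun c => l.map (fun x => if c.contains x then '0' else '1'))
      = pvG k (l.length - k) := by
  intro l
  induction l with
  | nil =>
    intro _ k hk
    have hk0 : k = 0 := by simpa using hk
    subst hk0
    simp [pvCombos, pvG]
  | cons a l ih =>
    intro hnd k hk
    have hal : a ∉ l := (List.nodup_cons.mp hnd).1
    have hndl : l.Nodup := (List.nodup_cons.mp hnd).2
    cases k with
    | zero =>
      have h0 := ih hndl 0 (Nat.zero_le _)
      rw [Nat.sub_zero] at h0
      conv_rhs => rw [pvG]
      rw [if_neg (by simp : ¬ ((0:Nat) = 0 ∧ (a :: l).length - 0 = 0))]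
      rw [dif_neg (by omega : ¬ (0:Nat) < 0)]
      rw [dif_pos (by simp : 0 < (a :: l).length - 0)]
      rw [show (a :: l).length - 0 - 1 = l.length from by simp]
      rw [← h0]
      simp [pvCombos]
    | succ k =>
      have ih1 := ih hndl k (by simpa using Nat.le_of_succ_le_succ hk)
      simp only [pvCombos, List.map_append, List.map_map]
      have e1 : ((pvCombos l k).map ((fun c => (a :: l).map fun x => if c.contains x then '0' else '1') ∘ fun c => a :: c))
          = ((pvCombos l k).map (fun c => l.map fun x => if c.contains x then '0' else '1')).map (fun cs => '0' :: cs) := by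
        rw [List.map_map]
        refine List.map_congr_left ?_
        intro c hc
        have hsub := pvCombos_subset hc
        simp only [Function.comp, List.map_cons, List.cons_eq_cons]
        refine ⟨by simp, List.map_congr_left ?_⟩
        intro y hy
        have hya : y ≠ a := fun h => hal (h ▸ hy)
        simp [hya]
      have e2 : ((pvCombos l (k + 1)).map (fun c => (a :: l).map fun x => if c.contains x then '0' else '1'))
          = ((pvCombos l (k + 1)).map (fun c => l.map fun x => if c.contains x then '0' else '1')).map (fun cs => '1' :: cs) := by
        rw [List.map_map]
        refine List.map_congr_left ?_
        intro c hc
        have hac : a ∉ c := fun h => hal (pvCombos_subset hc a h)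
        simp only [Function.comp, List.map_cons]
        simp [hac]
      rw [e1, e2, ih1]
      conv_rhs => rw [pvG]
      rw [if_neg (by simp only [List.length_cons]; omega : ¬ (k + 1 = 0 ∧ (a :: l).length - (k + 1) = 0))]
      rw [dif_pos (by omega : 0 < k + 1)]
      simp only [List.length_cons, show k + 1 - 1 = k from rfl,
        show l.length + 1 - (k + 1) = l.length - k from by omega]
      congr 1
      by_cases hko : k + 1 ≤ l.length
      · rw [dif_pos (by omega : 0 < l.length - k)]
        rw [ih hndl (k + 1) hko]
        congr 1
      · rw [dif_neg (by omega : ¬ 0 < l.length - k)]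
        rw [pvCombos_nil_of_lt (by omega)]
        simp

theorem mem_pvG_zero {z o : Nat} (hz : 0 < z) {cs : List Char} (h : cs ∈ pvG (z - 1) o) :
    ('0' :: cs) ∈ pvG z o := by
  rw [pvG, if_neg (by omega : ¬ (z = 0 ∧ o = 0)), dif_pos hz]
  exact List.mem_append_left _ (List.mem_map.mpr ⟨cs, h, rfl⟩)

theorem mem_pvG_one {z o : Nat} (ho : 0 < o) {cs : List Char} (h : cs ∈ pvG z (o - 1)) :
    ('1' :: cs) ∈ pvG z o := by
  rw [pvG, if_neg (by omega : ¬ (z = 0 ∧ o = 0))]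
  refine List.mem_append_right _ ?_
  rw [dif_pos ho]
  exact List.mem_map.mpr ⟨cs, h, rfl⟩

theorem nodup_pvG : ∀ (m z o : Nat), z + o ≤ m → (pvG z o).Nodup := by
  intro m
  induction m with
  | zero =>
    intro z o h
    have hz : z = 0 := by omega
    have ho : o = 0 := by omega
    subst hz; subst ho
    rw [pvG]; simp
  | succ m ihm =>
    intro z o h
    by_cases h0 : z = 0 ∧ o = 0
    · rw [pvG, if_pos h0]; simp
    · rw [pvG, if_neg h0]
      have hn0 : ((if _hz : 0 < z then (pvG (z - 1) o).map (fun cs => '0' :: cs) else []) : List (List Char)).Nodup := by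
        split
        · exact ((ihm (z - 1) o (by omega)).map (fun a b hab => by injection hab))
        · simp
      have hn1 : ((if _ho : 0 < o then (pvG z (o - 1)).map (fun cs => '1' :: cs) else []) : List (List Char)).Nodup := by
        split
        · exact ((ihm z (o - 1) (by omega)).map (fun a b hab => by injection hab))
        · simp
      refine List.Nodup.append hn0 hn1 ?_
      intro a ha hb
      split at ha
      · split at hb
        · rcases List.mem_map.mp ha with ⟨c0, _, rfl⟩
          rcases List.mem_map.mp hb with ⟨c1, _, hEq⟩
          injection hEq with h1 _
          exact absurd h1 (by decide)
        · simp at hb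
      · simp at ha

theorem set_add_of_not_mem {s : PySem.Set String} {x : String} (h : x ∉ s) :
    PySem.Set.add s x = s ++ [x] := by
  simp [PySem.Set.add, h]

theorem foldl_set_add (l : List String) : ∀ (acc : List String), l.Nodup → (∀ s ∈ l, s ∉ acc) →
    l.foldl PySem.Set.add acc = acc ++ l := by
  induction l with
  | nil => intro acc _ _; simp
  | cons a l ih =>
    intro acc hnd hfr
    simp only [List.foldl_cons]
    rw [set_add_of_not_mem (hfr a List.mem_cons_self)]
    rw [ih (acc ++ [a]) (List.nodup_cons.mp hnd).2 ?_]
    · simp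
    · intro s hs
      simp only [List.mem_append, List.mem_singleton]
      rintro (h | rfl)
      · exact hfr s (List.mem_cons_of_mem _ hs) h
      · exact (List.nodup_cons.mp hnd).1 hs

theorem pvDfs_eq : ∀ (m z o : Nat), z + o ≤ m → ∀ (p : List Char) (acc : PySem.Set String),
    (∀ cs ∈ pvG z o, String.ofList (p ++ cs) ∉ acc) →
    pvDfs p z o acc = acc ++ (pvG z o).map (fun cs => String.ofList (p ++ cs)) := by
  intro m
  induction m with
  | zero =>
    intro z o h p acc hfr
    have hz : z = 0 := by omega
    have ho : o = 0 := by omega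
    subst hz; subst ho
    rw [pvDfs, if_pos ⟨rfl, rfl⟩, pvG, if_pos ⟨rfl, rfl⟩]
    rw [set_add_of_not_mem (by simpa using hfr [] (by rw [pvG]; simp))]
    simp
  | succ m ihm =>
    intro z o h p acc hfr
    by_cases h0 : z = 0 ∧ o = 0
    · obtain ⟨rfl, rfl⟩ := h0
      rw [pvDfs, if_pos ⟨rfl, rfl⟩, pvG, if_pos ⟨rfl, rfl⟩]
      rw [set_add_of_not_mem (by simpa using hfr [] (by rw [pvG]; simp))]
      simp
    · rw [pvDfs, if_neg h0]
      rw [pvG, if_neg h0]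
      by_cases hz : 0 < z
      · have hacc1 : pvDfs (p ++ ['0']) (z - 1) o acc
            = acc ++ (pvG (z - 1) o).map (fun cs => String.ofList (p ++ '0' :: cs)) := by
          rw [ihm (z - 1) o (by omega) (p ++ ['0']) acc ?_]
          · simp
          · intro cs hcs
            rw [List.append_assoc]
            exact hfr ('0' :: cs) (mem_pvG_zero hz hcs)
        by_cases ho : 0 < o
        · rw [dif_pos hz, dif_pos ho, dif_pos hz, dif_pos ho, hacc1]
          rw [ihm z (o - 1) (by omega) (p ++ ['1']) _ ?_]
          · simp only [List.map_append, List.map_map, List.append_assoc]; rfl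
          · intro cs hcs
            rw [List.append_assoc]
            simp only [List.mem_append, not_or]
            refine ⟨hfr ('1' :: cs) (mem_pvG_one ho hcs), ?_⟩
            intro hmem
            rcases List.mem_map.mp hmem with ⟨cs0, _, hEq⟩
            rw [String.ofList_inj] at hEq
            have := List.append_cancel_left hEq
            simp at this
        · rw [dif_pos hz, dif_neg ho, dif_pos hz, dif_neg ho, hacc1]
          simp only [List.map_map, List.append_nil]; rfl
      · rw [dif_neg hz, dif_neg hz]
        have ho : 0 < o := by omega
        rw [dif_pos ho, dif_pos ho]
        rw [ihm z (o - 1) (by omega) (p ++ ['1']) acc ?_]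
        · simp only [List.map_map, List.nil_append, List.append_assoc]; rfl
        · intro cs hcs
          rw [List.append_assoc]
          exact hfr ('1' :: cs) (mem_pvG_one ho hcs)

-- ===== VERDICT (by name: the statement is the Claim_ definition above) =====
theorem zbits_spec : Claim_equal_zbits := by
  intro n k _ hpre
  obtain ⟨hn, hk0, hkn⟩ := hpre
  unfold Spec_zbits zbits zbits_alt
  rw [if_neg (by omega), if_neg (by omega), if_neg (by omega),
      if_neg (by omega), if_neg (by omega), if_neg (by omega)]
  have hlen : (PySem.List.pyRange 0 n 1).length = n.toNat := by
    rw [PySem.List.length_pyRange_one]; omega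
  have hnd : (PySem.List.pyRange 0 n 1).Nodup := PySem.List.nodup_pyRange_one 0 n
  have hkle : k.toNat ≤ (PySem.List.pyRange 0 n 1).length := by rw [hlen]; omega
  have hA := pvCombos_map_eq_pvG (PySem.List.pyRange 0 n 1) hnd k.toNat hkle
  rw [hlen] at hA
  have hsub : n.toNat - k.toNat = (n - k).toNat := by omega
  rw [hsub] at hA
  -- A's fold over combinations = the mapped string list
  have hfold : ∀ (L : List (List Int)) (g : List Int → String) (acc : PySem.Set String),
      L.foldl (fun r c => PySem.Set.add r (g c)) acc = (L.map g).foldl PySem.Set.add acc := by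
    intro L g
    induction L with
    | nil => intro acc; rfl
    | cons c L ihL => intro acc; simp only [List.foldl_cons, List.map_cons]; exact ihL _
  show (pvCombos (PySem.List.pyRange 0 n 1) k.toNat).foldl
      (fun result c =>
        PySem.Set.add result
          (String.ofList ((PySem.List.pyRange 0 n 1).map (fun x => if c.contains x then '0' else '1'))))
      PySem.Set.empty
    = pvDfs [] k.toNat (n - k).toNat PySem.Set.empty
  refine (hfold _ _ _).trans ?_
  rw [show ((pvCombos (PySem.List.pyRange 0 n 1) k.toNat).map
        (fun c => String.ofList ((PySem.List.pyRange 0 n 1).map (fun x => if c.contains x then '0' else '1'))))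
      = (pvG k.toNat (n - k).toNat).map String.ofList by
    rw [← hA, List.map_map]; rfl]
  rw [foldl_set_add _ PySem.Set.empty
        (((nodup_pvG (k.toNat + (n - k).toNat) k.toNat (n - k).toNat le_rfl)).map
          (fun a b hab => String.ofList_inj.mp hab))
        (by intro s _; simp [PySem.Set.empty])]
  rw [pvDfs_eq (k.toNat + (n - k).toNat) k.toNat (n - k).toNat le_rfl [] PySem.Set.empty
        (by intro cs _; simp [PySem.Set.empty])]
  simp [PySem.Set.empty]
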